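-- pv_equiv track=rewrite | github.com/Fijishi-Enterprises/GHE-Temperature-Plotting | try_find_min.py | _calc_number_boreholes
-- ===== SOURCE A (Python) =====
-- def _calc_number_boreholes(n_min: int, N1_max: int, N2_max: int) -> list:
--     """
--     calculation for number of boreholes which is higher than n but minimal total number
--     :param n_min: minimal number of boreholes
--     :param N1_max: maximal width of rectangular field (#)
--     :param N2_max: maximal length of rectangular field (#)
--     :return: list of possible solutions
--     """
--     # set default result
--     res = []
--     N1_max = min(n_min, N1_max)
--     N2_max = min(n_min, N2_max)
--     # set maximal number
--     max_val = N1_max * N2_max + 1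
--     # loop over maximal number in width and length
--     for l in range(1, N1_max + 1):
--         for b in range(int(n_min/l) + (n_min % l>0), N2_max + 1):
--             # determine current number
--             current_number: int = l * b
--             # save number of boreholes  and maximal value if is lower than current maximal value and higher than
--             # minimal value
--             if n_min <= current_number < max_val:
--                 res = [(l, b)]
--                 max_val = current_number
--             # also append combination if current number is equal to current maximal value
--             elif current_number == max_val:
--                 res.append((l, b))
--     # return list of possible solutions
--     return res
-- ===== SOURCE B (Python) =====
-- def _calc_number_boreholes(n_min: int, N1_max: int, N2_max: int) -> list:
--     """For each width l only the smallest admissible length b = ceil(n_min/l)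
--     can be optimal, so collect those candidates in one pass, then keep the
--     ones with the minimal product."""
--     N1 = min(n_min, N1_max)
--     N2 = min(n_min, N2_max)
--     cands = []
--     for l in range(1, N1 + 1):
--         b = -(-n_min // l)
--         if b <= N2:
--             cands.append((l, b))
--     if not cands:
--         return []
--     m = min(l * b for l, b in cands)
--     return [(l, b) for l, b in cands if l * b == m]
-- ===== Notes on version B (the rewrite author's own statement) =====
-- stated objective: faster
-- what changed: Replaces the nested scan over all (l,b) pairs with running min/tie state by a single pass that computes, for each width l, only the one viable candidate b=ceil(n_min/l), then keeps the candidates of minimal product.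
import Mathlib
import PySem

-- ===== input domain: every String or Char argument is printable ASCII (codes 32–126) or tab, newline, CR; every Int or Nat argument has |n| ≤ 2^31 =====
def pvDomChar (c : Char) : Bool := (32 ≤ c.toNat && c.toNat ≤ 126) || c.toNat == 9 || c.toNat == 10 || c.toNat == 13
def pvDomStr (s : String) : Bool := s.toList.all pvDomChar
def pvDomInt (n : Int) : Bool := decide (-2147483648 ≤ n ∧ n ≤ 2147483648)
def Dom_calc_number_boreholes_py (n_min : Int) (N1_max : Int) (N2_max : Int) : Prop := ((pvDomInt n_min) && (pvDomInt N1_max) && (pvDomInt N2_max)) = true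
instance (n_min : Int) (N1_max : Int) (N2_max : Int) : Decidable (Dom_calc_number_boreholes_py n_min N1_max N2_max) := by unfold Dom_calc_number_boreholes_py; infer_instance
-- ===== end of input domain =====

-- B replaces A's nested O(N1*N2) scan by one pass over l with b = ceil(n_min/l); objective: faster (asymptotic).

-- ===== PORT A =====
-- inner-loop body: if n_min <= c < max_val then reset; elif c == max_val then append
def pvInnerA (n_min : Int) (l : Int) (st : List (Int × Int) × Int) (b : Int) : List (Int × Int) × Int :=
  let c := l * b
  if n_min ≤ c ∧ c < st.2 then ([(l, b)], c)
  else if c = st.2 then (st.1 ++ [(l, b)], st.2)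
  else st

-- one iteration of A's outer loop; 'int(n_min/l)' is float division truncated: on Dom
-- (|n_min| ≤ 2^31, and here 1 ≤ l) that truncation is exactly Int.tdiv (quotient < 2^31,
-- absolute rounding error < 1/l), so it is ported as n_min.tdiv l.
def pvOuterA (n_min : Int) (N2 : Int) (st : List (Int × Int) × Int) (l : Int) : List (Int × Int) × Int :=
  (PySem.List.pyRange (n_min.tdiv l + (if PySem.Int.mod n_min l > 0 then 1 else 0)) (N2 + 1) 1).foldl
    (pvInnerA n_min l) st

def calc_number_boreholes_py (n_min : Int) (N1_max : Int) (N2_max : Int) : List (Int × Int) :=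
  let N1 := min n_min N1_max
  let N2 := min n_min N2_max
  ((PySem.List.pyRange 1 (N1 + 1) 1).foldl (pvOuterA n_min N2) ([], N1 * N2 + 1)).1

-- ===== PORT B =====
-- ceiling division -(-n_min // l), as in Source B
def pvCeilB (n_min : Int) (l : Int) : Int := -(PySem.Int.floordiv (-n_min) l)

def calc_number_boreholes_py_alt (n_min : Int) (N1_max : Int) (N2_max : Int) : List (Int × Int) :=
  let N1 := min n_min N1_max
  let N2 := min n_min N2_max
  let cands := (PySem.List.pyRange 1 (N1 + 1) 1).foldl
      (fun acc l => let b := pvCeilB n_min l; if b ≤ N2 then acc ++ [(l, b)] else acc) []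
  if cands = [] then []
  else
    match PySem.List.min? (cands.map (fun p => p.1 * p.2)) (fun x => x) with
    | none => []
    | some m => cands.filter (fun p => p.1 * p.2 == m)

-- ===== PRECONDITION & SPEC =====
def Spec_calc_number_boreholes_py (n_min : Int) (N1_max : Int) (N2_max : Int) (out : List (Int × Int)) : Prop := out = calc_number_boreholes_py_alt n_min N1_max N2_max
instance (n_min : Int) (N1_max : Int) (N2_max : Int) (out : List (Int × Int)) : Decidable (Spec_calc_number_boreholes_py n_min N1_max N2_max out) := by unfold Spec_calc_number_boreholes_py; infer_instance

-- ===== CLAIM (what is proved, stated in full; the proofs are below) =====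
def Claim_equal_calc_number_boreholes_py : Prop := ∀ (n_min : Int) (N1_max : Int) (N2_max : Int), Dom_calc_number_boreholes_py n_min N1_max N2_max → Spec_calc_number_boreholes_py n_min N1_max N2_max (calc_number_boreholes_py n_min N1_max N2_max)

-- ===== LEMMAS AND PROOFS =====

-- ceiling characterisation of pvCeilB
theorem pvCeilB_spec (n l : Int) (hl : 0 < l) :
    (pvCeilB n l - 1) * l < n ∧ n ≤ pvCeilB n l * l := by
  have h := (PySem.Int.neg_floordiv_neg_eq_iff_of_pos (a := n) (b := l) (q := pvCeilB n l) hl).mp rfl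
  exact h

-- A's inner-loop start index equals B's ceiling division (for positive n, l)
theorem pvStartA_eq (n l : Int) (hn : 0 < n) (hl : 0 < l) :
    n.tdiv l + (if PySem.Int.mod n l > 0 then 1 else 0) = pvCeilB n l := by
  have hmod : PySem.Int.mod n l = n % l := PySem.Int.mod_eq_emod_of_pos (a := n) (b := l) hl
  have htd : n.tdiv l = n / l := Int.tdiv_eq_ediv_of_nonneg (le_of_lt hn)
  have hdm : n % l + l * (n / l) = n := Int.emod_add_ediv n l
  have hr0 : 0 ≤ n % l := Int.emod_nonneg n (ne_of_gt hl)
  have hrl : n % l < l := Int.emod_lt_of_pos n hl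
  symm
  rw [hmod, htd]
  apply (PySem.Int.neg_floordiv_neg_eq_iff_of_pos hl).mpr
  constructor
  · split_ifs with h
    · have : (n / l + 1 - 1) * l = l * (n / l) := by ring
      rw [this]; omega
    · have : (n / l + 0 - 1) * l = l * (n / l) - l := by ring
      rw [this]; omega
  · split_ifs with h
    · have : (n / l + 1) * l = l * (n / l) + l := by ring
      rw [this]; omega
    · have : (n / l + 0) * l = l * (n / l) := by ring
      rw [this]; omega

-- skip lemma: once every remaining product strictly exceeds the running minimum, the fold is inert
theorem pvSkip (n l : Int) : ∀ (bs : List Int) (st : List (Int × Int) × Int),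
    (∀ b ∈ bs, st.2 < l * b) → bs.foldl (pvInnerA n l) st = st := by
  intro bs
  induction bs with
  | nil => intro st _; rfl
  | cons b t ih =>
    intro st h
    have hb := h b (List.mem_cons_self ..)
    have hst : pvInnerA n l st b = st := by
      simp only [pvInnerA]
      rw [if_neg (by push_neg; intro _; omega), if_neg (by omega)]
    rw [List.foldl_cons, hst]
    exact ih st (fun x hx => h x (List.mem_cons_of_mem _ hx))

-- one outer iteration processes at most the single candidate (l, ceil(n/l))
theorem pvOuterA_eq (n N2 l : Int) (hn : 0 < n) (hl : 0 < l) (st : List (Int × Int) × Int) :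
    pvOuterA n N2 st l =
      (if pvCeilB n l ≤ N2 then pvInnerA n l st (pvCeilB n l) else st) := by
  unfold pvOuterA
  rw [pvStartA_eq n l hn hl]
  set b0 := pvCeilB n l with hb0
  by_cases hle : b0 ≤ N2
  · rw [if_pos hle, PySem.List.pyRange_one_cons (by omega), List.foldl_cons]
    apply pvSkip
    intro b hb
    rw [PySem.List.mem_pyRange_one] at hb
    have hceil := pvCeilB_spec n l hl
    have hsnd : (pvInnerA n l st b0).2 ≤ l * b0 := by
      simp only [pvInnerA]
      split_ifs with h1 h2
      · simp
      · simp only []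
        omega
      · push_neg at h1
        have hnle : n ≤ l * b0 := by
          have := hceil.2; nlinarith
        omega
    have : l * b0 + l ≤ l * b := by nlinarith [hb.1]
    omega
  · rw [if_neg hle, PySem.List.pyRange_one_eq_nil (by omega)]
    rfl

-- B's candidate list in closed form
def pvCands (n N2 : Int) (L : List Int) : List (Int × Int) :=
  L.filterMap (fun l => if pvCeilB n l ≤ N2 then some (l, pvCeilB n l) else none)

theorem pvCands_foldl (n N2 : Int) : ∀ (L : List Int) (acc : List (Int × Int)),
    L.foldl (fun acc l => let b := pvCeilB n l; if b ≤ N2 then acc ++ [(l, b)] else acc) acc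
      = acc ++ pvCands n N2 L := by
  intro L
  induction L with
  | nil => intro acc; simp [pvCands]
  | cons l t ih =>
    intro acc
    simp only [List.foldl_cons, pvCands, List.filterMap_cons]
    by_cases h : pvCeilB n l ≤ N2
    · simp only [h, if_pos h, ih, pvCands]; simp
    · simp only [h, if_neg h, ih, pvCands]; simp

-- invariant tying A's running state to the candidates processed so far
def pvInv (n N1 N2 : Int) (C : List (Int × Int)) (st : List (Int × Int) × Int) : Prop :=
  st.1 = C.filter (fun p => p.1 * p.2 == st.2) ∧
  (∀ p ∈ C, st.2 ≤ p.1 * p.2) ∧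
  ((C = [] ∧ st.2 = N1 * N2 + 1) ∨ (st.2 ∈ C.map (fun p => p.1 * p.2) ∧ st.2 < N1 * N2 + 1))

theorem pvCeilB_pos (n l : Int) (hn : 0 < n) (hl : 0 < l) : 0 < pvCeilB n l := by
  have h := (pvCeilB_spec n l hl).2
  nlinarith

theorem pvMain (n N1 N2 : Int) (hn : 0 < n) :
    ∀ (L : List Int) (C : List (Int × Int)) (st : List (Int × Int) × Int),
    (∀ l ∈ L, 1 ≤ l ∧ l ≤ N1) → pvInv n N1 N2 C st →
    pvInv n N1 N2 (C ++ pvCands n N2 L) (L.foldl (pvOuterA n N2) st) := by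
  intro L
  induction L with
  | nil => intro C st _ hInv; simpa [pvCands] using hInv
  | cons l t ih =>
    intro C st hmem hInv
    have hl := hmem l (List.mem_cons_self ..)
    have hl0 : 0 < l := by omega
    rw [List.foldl_cons, pvOuterA_eq n N2 l hn hl0]
    have hcons : pvCands n N2 (l :: t) = pvCands n N2 [l] ++ pvCands n N2 t := by
      simp only [pvCands, List.filterMap_cons, List.filterMap_nil]
      split <;> simp
    rw [hcons, ← List.append_assoc]
    apply ih _ _ (fun x hx => hmem x (List.mem_cons_of_mem _ hx))
    -- step: process candidate of l
    set b0 := pvCeilB n l with hb0def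
    obtain ⟨hfil, hlb, hdisj⟩ := hInv
    by_cases hle : b0 ≤ N2
    · rw [if_pos hle]
      have hcl : pvCands n N2 [l] = [(l, b0)] := by
        simp only [pvCands, List.filterMap_cons, List.filterMap_nil]
        rw [if_pos hle]
      rw [hcl]
      have hceil := pvCeilB_spec n l hl0
      have hnle : n ≤ l * b0 := by nlinarith [hceil.2]
      have hb0pos : 0 < b0 := pvCeilB_pos n l hn hl0
      have hcbound : l * b0 ≤ N1 * N2 := by
        have := mul_le_mul hl.2 hle (le_of_lt hb0pos) (by omega)
        exact this
      simp only [pvInnerA]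
      rcases lt_trichotomy (l * b0) st.2 with hc | hc | hc
      · rw [if_pos ⟨hnle, hc⟩]
        refine ⟨?_, ?_, ?_⟩
        · simp only [List.filter_append]
          have : C.filter (fun p => p.1 * p.2 == l * b0) = [] := by
            rw [List.filter_eq_nil_iff]
            intro p hp
            have := hlb p hp
            simp only [beq_iff_eq]
            omega
          simp [this]
        · intro p hp
          rcases List.mem_append.mp hp with h | h
          · have := hlb p h; simp; omega
          · simp at h; simp [h]
        · right
          constructor
          · simp
          · simp only []
            rcases hdisj with ⟨_, h2⟩ | ⟨_, h2⟩ <;> omega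
      · rw [if_neg (by push_neg; intro _; omega), if_pos hc]
        refine ⟨?_, ?_, ?_⟩
        · simp only [List.filter_append, hfil]
          simp [hc]
        · intro p hp
          rcases List.mem_append.mp hp with h | h
          · exact hlb p h
          · simp at h; simp [h]; omega
        · right
          refine ⟨by simp [← hc], ?_⟩
          omega
      · rw [if_neg (by push_neg; intro _; omega), if_neg (by omega)]
        refine ⟨?_, ?_, ?_⟩
        · simp only [List.filter_append, hfil]
          have : (l, b0).1 * (l, b0).2 ≠ st.2 := by simp; omega
          simp [this]
        · intro p hp
          rcases List.mem_append.mp hp with h | h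
          · exact hlb p h
          · simp at h; simp [h]; omega
        · rcases hdisj with ⟨h1, h2⟩ | ⟨h1, h2⟩
          · omega
          · right
            exact ⟨by simp [List.mem_append]; left; simpa using h1, h2⟩
    · rw [if_neg hle]
      have : pvCands n N2 [l] = [] := by
        simp only [pvCands, List.filterMap_cons, List.filterMap_nil]
        rw [if_neg hle]
      rw [this, List.append_nil]
      exact ⟨hfil, hlb, hdisj⟩

-- ===== VERDICT (by name: the statement is the Claim_ definition above) =====
theorem calc_number_boreholes_py_spec : Claim_equal_calc_number_boreholes_py := by
  intro n_min N1_max N2_max _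
  unfold Spec_calc_number_boreholes_py calc_number_boreholes_py calc_number_boreholes_py_alt
  simp only []
  set N1 := min n_min N1_max with hN1def
  set N2 := min n_min N2_max with hN2def
  by_cases hn : 0 < n_min
  · have hN1 : N1 ≤ n_min := min_le_left _ _
    have hm := pvMain n_min N1 N2 hn (PySem.List.pyRange 1 (N1 + 1) 1) [] ([], N1 * N2 + 1)
      (fun l hl => by rw [PySem.List.mem_pyRange_one] at hl; omega)
      (by refine ⟨by simp, by simp, Or.inl ⟨rfl, rfl⟩⟩)
    rw [List.nil_append] at hm
    set L := PySem.List.pyRange 1 (N1 + 1) 1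
    set st := L.foldl (pvOuterA n_min N2) ([], N1 * N2 + 1) with hstdef
    obtain ⟨hfil, hlb, hdisj⟩ := hm
    rw [pvCands_foldl n_min N2 L [], List.nil_append]
    by_cases hC : pvCands n_min N2 L = []
    · rw [if_pos hC, hfil, hC, List.filter_nil]
    · rw [if_neg hC]
      rcases hdisj with ⟨h1, _⟩ | ⟨h1, _⟩
      · exact absurd h1 hC
      · rcases hmin : PySem.List.min? ((pvCands n_min N2 L).map (fun p => p.1 * p.2)) (fun x => x)
          with _ | m
        · have := (PySem.List.min?_eq_none_iff ((pvCands n_min N2 L).map (fun p => p.1 * p.2))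
            (fun x => x)).mp hmin
          simp only [List.map_eq_nil_iff] at this
          exact absurd this hC
        · have hmem := PySem.List.min?_mem hmin
          have hisMin : m ≤ st.2 := by simpa using PySem.List.min?_isMin hmin st.2 h1
          have hstle : st.2 ≤ m := by
            simp only [List.mem_map] at hmem
            obtain ⟨p, hp, hpm⟩ := hmem
            have := hlb p hp
            omega
          have hms : m = st.2 := le_antisymm hisMin hstle
          simp only [hmin]
          rw [hms]
          exact hfil
  · have hN1 : N1 ≤ n_min := min_le_left _ _
    have hL : PySem.List.pyRange 1 (N1 + 1) 1 = [] := PySem.List.pyRange_one_eq_nil (by omega)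
    rw [hL]
    simp
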